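-- pv_equiv track=rewrite | github.com/pythexcel/ChristieScraper | phillipsbot.py | ModelYear
-- ===== SOURCE A (Python) =====
-- def ModelYear(ModelList=None):
--     yeardata = None
--     if ModelList:
--         ModelData = ModelList[0].strip().split(" ")
--         nextIndex = None
--         for data in range(0,len(ModelData)):
--             listt = ["CIRCA","Circa","circa"]
--             if ModelData[data] in listt:
--                 nextIndex = data + 1
--                 continue
--             Mlistt = ["MANUFACTURED","Manufactured","manufactured"]
--             if ModelData[data] in Mlistt:
--                 nextIndex = data + 2
--                 continue
--         if nextIndex is None:
--             nextIndex = 0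
--         if nextIndex is not None:
--             data = ModelData[nextIndex]
--             yeardata = data.strip()
--             if len(yeardata) == 4:
--                 return yeardata
--             else:
--                 return yeardata
--         else:
--             return yeardata
--     else:
--         return yeardata
-- ===== SOURCE B (Python) =====
-- _MARKERS = (("CIRCA", 1), ("Circa", 1), ("circa", 1),
--             ("MANUFACTURED", 2), ("Manufactured", 2), ("manufactured", 2))
--
--
-- def ModelYear(ModelList=None):
--     if not ModelList:
--         return None
--     words = ModelList[0].strip().split(" ")
--     rev = words[::-1]
--     best_pos, best_off = -1, 0
--     for marker, off in _MARKERS: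
--         if marker in rev:
--             pos = len(words) - 1 - rev.index(marker)
--             if pos > best_pos:
--                 best_pos, best_off = pos, off
--     index = best_pos + best_off if best_pos >= 0 else 0
--     return words[index].strip()
-- ===== Notes on version B (the rewrite author's own statement) =====
-- stated objective: alternative
-- what changed: Instead of A's element-by-element scan of the word list tracking nextIndex, B searches per marker word: for each of the six marker spellings it finds that word's last occurrence via a reversed-list index lookup, takes the maximum position over markers (with its offset), and indexes from that; B also drops A's dead branches (the identical len==4 if/else and the unreachable else).
import Mathlib
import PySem

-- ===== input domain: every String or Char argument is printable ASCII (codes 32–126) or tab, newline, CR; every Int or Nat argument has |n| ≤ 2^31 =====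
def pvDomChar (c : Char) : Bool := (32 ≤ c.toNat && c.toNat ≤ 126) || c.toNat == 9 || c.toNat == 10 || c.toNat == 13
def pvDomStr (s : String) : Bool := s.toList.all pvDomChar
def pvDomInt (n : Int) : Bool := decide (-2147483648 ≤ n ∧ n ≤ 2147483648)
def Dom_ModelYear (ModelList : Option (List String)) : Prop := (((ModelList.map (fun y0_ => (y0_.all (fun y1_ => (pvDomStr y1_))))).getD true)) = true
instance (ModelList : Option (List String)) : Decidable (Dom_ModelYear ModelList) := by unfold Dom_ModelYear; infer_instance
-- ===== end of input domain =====

-- B replaces A's element-by-element scan by per-marker last-occurrence searches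
-- (reversed-list index lookup for each of the six marker spellings, then the max
-- position wins); return value only.

-- `s.split(" ")` (sep is the nonempty literal " ", so Python never raises; split? is some)
def pySplitSpace (s : String) : List String := (PySem.Str.split? s " ").getD []
-- `ModelData[data]` for a Nat index inside A's loop (always in range there)
def wordAt (md : List String) (i : Nat) : String := md.getD i ""
-- `w in ["CIRCA","Circa","circa"]` resp. the Manufactured list (A's membership tests)
def isCircaW (w : String) : Bool := w == "CIRCA" || w == "Circa" || w == "circa"
def isManuW (w : String) : Bool := w == "MANUFACTURED" || w == "Manufactured" || w == "manufactured"

-- ===== PORT A =====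
-- loop body of A's forward `for data in range(0, len(ModelData))`
def aStep (md : List String) (st : Option Nat) (data : Nat) : Option Nat :=
  if isCircaW (wordAt md data) then some (data + 1)
  else if isManuW (wordAt md data) then some (data + 2)
  else st

def ModelYear (ModelList : Option (List String)) : Option String :=
  match ModelList with
  | none => none
  | some [] => none                                    -- `if ModelList:` false
  | some (x :: _) =>
    let md := pySplitSpace (PySem.Str.strip x)
    let nextIndexOpt := (List.range md.length).foldl (aStep md) none
    let nextIndex := nextIndexOpt.getD 0               -- `if nextIndex is None: nextIndex = 0`
    match PySem.List.pyGet? md (nextIndex : Int) with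
    | none => none                                     -- Python raises IndexError; outside Pre_
    | some d =>
      let yeardata := PySem.Str.strip d
      if PySem.Str.len yeardata = 4 then some yeardata else some yeardata

-- ===== PORT B =====
-- the module constant _MARKERS
def bMarkers : List (String × Nat) :=
  [("CIRCA", 1), ("Circa", 1), ("circa", 1),
   ("MANUFACTURED", 2), ("Manufactured", 2), ("manufactured", 2)]

-- body of B's `for marker, off in _MARKERS` loop, acting on (best_pos, best_off)
def bStep (n : Nat) (rev : List String) (b : Int × Nat) (p : String × Nat) : Int × Nat :=
  if rev.contains p.1 then
    let pos : Int := (n : Int) - 1 - (((PySem.List.index? rev p.1).getD 0 : Nat) : Int)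
    if pos > b.1 then (pos, p.2) else b
  else b

def ModelYear_alt (ModelList : Option (List String)) : Option String :=
  match ModelList with
  | none => none
  | some [] => none
  | some (x :: _) =>
    let words := pySplitSpace (PySem.Str.strip x)
    let rev := (PySem.List.slice? words none none (-1)).getD []   -- words[::-1]
    let best := bMarkers.foldl (bStep words.length rev) (-1, 0)
    let index : Int := if 0 ≤ best.1 then best.1 + (best.2 : Int) else 0
    match PySem.List.pyGet? words index with
    | none => none                                     -- Python raises IndexError; outside Pre_
    | some w => some (PySem.Str.strip w)

-- ===== PRECONDITION & SPEC =====
-- Pre_ excludes exactly the inputs on which A raises IndexError: a nonempty list whose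
-- first string's last marker word sits so close to the end that its target index
-- (position+1 for circa, position+2 for manufactured) is out of range.
def Pre_ModelYear (ModelList : Option (List String)) : Prop :=
  match ModelList with
  | none => True
  | some [] => True
  | some (x :: _) =>
    let ws := pySplitSpace (PySem.Str.strip x)
    ∀ i ∈ List.range ws.length, (isCircaW (wordAt ws i) || isManuW (wordAt ws i)) = true →
      (if isCircaW (wordAt ws i) then i + 1 else i + 2) < ws.length ∨
      ∃ j ∈ List.range ws.length, i < j ∧
        (isCircaW (wordAt ws j) || isManuW (wordAt ws j)) = true ∧
        (if isCircaW (wordAt ws j) then j + 1 else j + 2) < ws.length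
instance (ModelList : Option (List String)) : Decidable (Pre_ModelYear ModelList) := by
  unfold Pre_ModelYear
  match ModelList with
  | none => infer_instance
  | some [] => infer_instance
  | some (x :: _) => infer_instance

def pvWitness_ModelYear : Option (List String) := some ["circa 1920"]

def Spec_ModelYear (ModelList : Option (List String)) (out : Option String) : Prop := out = ModelYear_alt ModelList
instance (ModelList : Option (List String)) (out : Option String) : Decidable (Spec_ModelYear ModelList out) := by unfold Spec_ModelYear; infer_instance

-- ===== CLAIM (what is proved, stated in full; the proofs are below) =====
def Claim_equal_ModelYear : Prop := ∀ (ModelList : Option (List String)), Dom_ModelYear ModelList → Pre_ModelYear ModelList → Spec_ModelYear ModelList (ModelYear ModelList)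

-- ===== LEMMAS AND PROOFS =====

-- a word is a marker
def isMark (md : List String) (i : Nat) : Bool := isCircaW (wordAt md i) || isManuW (wordAt md i)
-- the index A's loop would leave behind for marker position j
def targetOf (md : List String) (j : Nat) : Nat :=
  if isCircaW (wordAt md j) then j + 1 else j + 2
-- the last marker index < n, if any
def lastM (md : List String) : Nat → Option Nat
  | 0 => none
  | n + 1 => if isMark md n then some n else lastM md n
-- last-occurrence position of m in md, -1 if absent (what B computes per marker)
def posOf (md : List String) (m : String) : Int :=
  if md.reverse.contains m then (md.length : Int) - 1 - (((PySem.List.index? md.reverse m).getD 0 : Nat) : Int) else -1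

lemma foldl_aStep (md : List String) : ∀ (n : Nat) (st : Option Nat),
    (List.range n).foldl (aStep md) st =
      match lastM md n with
      | some j => some (targetOf md j)
      | none => st := by
  intro n
  induction n with
  | zero => intro st; simp [lastM]
  | succ n ih =>
    intro st
    rw [List.range_succ, List.foldl_append, List.foldl_cons, List.foldl_nil, ih]
    by_cases h : isMark md n = true
    · rcases Bool.or_eq_true_iff.mp (by simpa [isMark] using h) with hc | hm
      · simp [aStep, lastM, isMark, hc, targetOf]
      · by_cases hc : isCircaW (wordAt md n) = true
        · simp [aStep, lastM, isMark, hc, targetOf]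
        · simp [aStep, lastM, isMark, hc, hm, targetOf]
    · have hc : isCircaW (wordAt md n) = false := by
        cases hx : isCircaW (wordAt md n) <;> simp_all [isMark]
      have hm : isManuW (wordAt md n) = false := by
        cases hx : isManuW (wordAt md n) <;> simp_all [isMark]
      simp [aStep, lastM, h, hc, hm]

lemma lastM_none (md : List String) : ∀ n, lastM md n = none → ∀ k, k < n → isMark md k = false := by
  intro n
  induction n with
  | zero => intro _ k hk; omega
  | succ n ih =>
    intro h k hk
    by_cases hm : isMark md n = true
    · simp [lastM, hm] at h
    · rw [Bool.not_eq_true] at hm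
      simp [lastM, hm] at h
      rcases Nat.lt_succ_iff_lt_or_eq.mp hk with h' | rfl
      · exact ih h k h'
      · exact hm

lemma lastM_some (md : List String) : ∀ n j, lastM md n = some j →
    j < n ∧ isMark md j = true ∧ ∀ k, j < k → k < n → isMark md k = false := by
  intro n
  induction n with
  | zero => intro j h; simp [lastM] at h
  | succ n ih =>
    intro j h
    by_cases hm : isMark md n = true
    · simp [lastM, hm] at h
      subst h
      exact ⟨Nat.lt_succ_self _, hm, fun k h1 h2 => by omega⟩
    · rw [Bool.not_eq_true] at hm
      simp [lastM, hm] at h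
      obtain ⟨h1, h2, h3⟩ := ih j h
      refine ⟨by omega, h2, fun k hk1 hk2 => ?_⟩
      rcases Nat.lt_succ_iff_lt_or_eq.mp hk2 with h' | rfl
      · exact h3 k hk1 h'
      · exact hm

lemma posOf_not_mem (md : List String) (m : String) (h : m ∉ md) : posOf md m = -1 := by
  simp [posOf, h]

lemma posOf_mem (md : List String) (m : String) (h : m ∈ md) :
    ∃ k : Nat, posOf md m = (k : Int) ∧ k < md.length ∧ wordAt md k = m ∧
      ∀ t, k < t → t < md.length → wordAt md t ≠ m := by
  have hmem : m ∈ md.reverse := by simpa using h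
  have hcon : md.reverse.contains m = true := by simpa using hmem
  cases hi : PySem.List.index? md.reverse m with
  | none => exact absurd ((PySem.List.index?_eq_none_iff md.reverse m).mp hi) (by simpa using hmem)
  | some i =>
    obtain ⟨hlt, hget, hbefore⟩ := PySem.List.getElem_of_index?_eq_some hi
    have hlen : i < md.length := by simpa using hlt
    have hgm : md[md.length - 1 - i]'(by omega) = m := by
      have hrev0 := List.getElem_reverse (l := md) (i := i) hlt
      rw [← hrev0]; exact hget
    refine ⟨md.length - 1 - i, ?_, by omega, ?_, ?_⟩
    · unfold posOf
      rw [if_pos hcon, hi, Option.getD_some]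
      omega
    · simpa [wordAt, List.getD_eq_getElem?_getD,
        List.getElem?_eq_getElem (show md.length - 1 - i < md.length by omega)] using hgm
    · intro t ht1 ht2 hcontra
      have hmdt : md[t]'ht2 = m := by
        simpa [wordAt, List.getD_eq_getElem?_getD, List.getElem?_eq_getElem ht2] using hcontra
      have hr : md.length - 1 - t < i := by omega
      have hrev : md.reverse[md.length - 1 - t]'(by simp; omega) = m := by
        rw [List.getElem_reverse]
        simpa [show md.length - 1 - (md.length - 1 - t) = t from by omega] using hmdt
      exact hbefore _ hr hrev

-- the step in posOf form
lemma bStep_eq (md : List String) (b : Int × Nat) (p : String × Nat) (hb : -1 ≤ b.1) :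
    bStep md.length md.reverse b p =
      if posOf md p.1 > b.1 then (posOf md p.1, p.2) else b := by
  unfold bStep posOf
  by_cases h : md.reverse.contains p.1 = true
  · rw [if_pos h, if_pos h]
  · rw [if_neg h, if_neg h, if_neg (by omega : ¬ ((-1 : Int) > b.1))]

lemma foldl_bStep_const (md : List String) : ∀ (ps : List (String × Nat)) (b : Int × Nat),
    -1 ≤ b.1 → (∀ p ∈ ps, posOf md p.1 ≤ b.1) →
    ps.foldl (bStep md.length md.reverse) b = b := by
  intro ps
  induction ps with
  | nil => intro b _ _; rfl
  | cons p ps ih =>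
    intro b hb hall
    rw [List.foldl_cons, bStep_eq md b p hb]
    have hp : posOf md p.1 ≤ b.1 := hall p (by simp)
    rw [if_neg (by omega)]
    exact ih b hb (fun q hq => hall q (by simp [hq]))

lemma foldl_bStep_max (md : List String) (j : Nat) (o : Nat) :
    ∀ (ps1 : List (String × Nat)) (p : String × Nat) (ps2 : List (String × Nat)) (b : Int × Nat),
    -1 ≤ b.1 → b.1 < (j : Int) → posOf md p.1 = (j : Int) → p.2 = o →
    (∀ q ∈ ps1, posOf md q.1 < (j : Int)) → (∀ q ∈ ps2, posOf md q.1 ≤ (j : Int)) →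
    (ps1 ++ p :: ps2).foldl (bStep md.length md.reverse) b = ((j : Int), o) := by
  intro ps1
  induction ps1 with
  | nil =>
    intro p ps2 b hb hlt hp ho _ h2
    rw [List.nil_append, List.foldl_cons, bStep_eq md b p hb, hp, if_pos (by omega)]
    subst ho
    exact foldl_bStep_const md ps2 _ (by show (-1 : Int) ≤ (j : Int); omega) (by simpa using h2)
  | cons q ps1 ih =>
    intro p ps2 b hb hlt hp ho h1 h2
    rw [List.cons_append, List.foldl_cons, bStep_eq md b q hb]
    have hq : posOf md q.1 < (j : Int) := h1 q (by simp)
    by_cases hgt : posOf md q.1 > b.1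
    · rw [if_pos hgt]
      exact ih p ps2 _ (by show (-1 : Int) ≤ posOf md q.1; omega) (by show posOf md q.1 < (j : Int); exact hq) hp ho (fun r hr => h1 r (by simp [hr])) h2
    · rw [if_neg hgt]
      exact ih p ps2 b hb hlt hp ho (fun r hr => h1 r (by simp [hr])) h2

-- the central index equality: B's computed index equals A's nextIndex
lemma index_eq (md : List String) :
    (if 0 ≤ (bMarkers.foldl (bStep md.length md.reverse) (-1, 0)).1
     then (bMarkers.foldl (bStep md.length md.reverse) (-1, 0)).1 +
          ((bMarkers.foldl (bStep md.length md.reverse) (-1, 0)).2 : Int)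
     else 0) =
    ((((List.range md.length).foldl (aStep md) none).getD 0 : Nat) : Int) := by
  rw [foldl_aStep]
  cases hL : lastM md md.length with
  | none =>
    have hnomark := lastM_none md md.length hL
    have hnm : ∀ p ∈ bMarkers, posOf md p.1 ≤ (-1 : Int) := by
      intro p hp
      have : p.1 ∉ md := by
        intro hmem
        obtain ⟨k, hk⟩ := List.mem_iff_getElem.mp hmem
        have hkm : isMark md k = true := by
          have hw : wordAt md k = p.1 := by
            simp [wordAt, List.getD_eq_getElem?_getD, List.getElem?_eq_getElem hk.1, hk.2]
          fin_cases hp <;> simp_all [isMark, isCircaW, isManuW]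
        have := hnomark k hk.1
        simp_all
      rw [posOf_not_mem md p.1 this]
    rw [foldl_bStep_const md bMarkers (-1, 0) (by simp) hnm]
    simp
  | some j =>
    obtain ⟨hjlt, hjm, hjmax⟩ := lastM_some md md.length j hL
    -- the word at j, one of the six markers
    have hmem : wordAt md j ∈ md := by
      have hwj : wordAt md j = md[j]'hjlt := by
        simp [wordAt, List.getD_eq_getElem?_getD, List.getElem?_eq_getElem hjlt]
      rw [hwj]; exact List.getElem_mem hjlt
    obtain ⟨k, hkpos, hklt, hkw, hkmax⟩ := posOf_mem md (wordAt md j) hmem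
    -- the last occurrence of md[j] is j itself
    have hkj : k = j := by
      by_cases h : k < j
      · exact absurd (hkmax j h hjlt rfl) (by simp)
      · by_cases h' : j < k
        · have : isMark md k = true := by
            simp only [isMark]
            rw [hkw]; exact hjm
          have := hjmax k h' hklt
          simp_all
        · omega
    rw [hkj] at hkpos
    -- any other marker's last occurrence is < j
    have hother : ∀ p ∈ bMarkers, p.1 ≠ wordAt md j → posOf md p.1 < (j : Int) := by
      intro p hp hne
      by_cases hm : p.1 ∈ md
      · obtain ⟨t, htpos, htlt, htw, htmax⟩ := posOf_mem md p.1 hm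
        rw [htpos]
        have hmarkt : isMark md t = true := by
          fin_cases hp <;> simp_all [isMark, isCircaW, isManuW]
        by_cases h : j < t
        · have := hjmax t h htlt; simp_all
        · have : t ≠ j := fun he => hne (by rw [← he, htw])
          omega
      · rw [posOf_not_mem md p.1 hm]; omega
    -- split bMarkers at the marker equal to md[j], apply the fold lemma
    have hcases : wordAt md j = "CIRCA" ∨ wordAt md j = "Circa" ∨ wordAt md j = "circa" ∨
        wordAt md j = "MANUFACTURED" ∨ wordAt md j = "Manufactured" ∨ wordAt md j = "manufactured" := by
      have := hjm
      simp only [isMark, isCircaW, isManuW, Bool.or_eq_true, beq_iff_eq] at this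
      tauto
    have htgt : targetOf md j = j + (if isCircaW (wordAt md j) then 1 else 2) := by
      simp only [targetOf]; split <;> rfl
    have hfold : ∀ (ps1 : List (String × Nat)) (p : String × Nat) (ps2 : List (String × Nat)),
        bMarkers = ps1 ++ p :: ps2 → p.1 = wordAt md j →
        bMarkers.foldl (bStep md.length md.reverse) (-1, 0) = ((j : Int), p.2) := by
      intro ps1 p ps2 heq hpw
      rw [heq]
      refine foldl_bStep_max md j p.2 ps1 p ps2 (-1, 0) (by simp) (by simp; omega)
        (by rw [hpw, hkpos]) rfl ?_ ?_
      · intro q hq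
        by_cases hqe : q.1 = wordAt md j
        · exfalso
          have hnd : (bMarkers.map Prod.fst).Nodup := by decide
          rw [heq, List.map_append, List.map_cons] at hnd
          have hdisj := (List.nodup_append.mp hnd).2.2
          have hq1 : q.1 = p.1 := hqe.trans hpw.symm
          exact hdisj q.1 (List.mem_map_of_mem hq) p.1 (List.mem_cons_self ..) hq1
        · exact hother q (by rw [heq]; exact List.mem_append_left _ hq) (by simpa [hpw] using hqe)
      · intro q hq
        by_cases hqe : q.1 = wordAt md j
        · rw [hqe, hkpos]
        · exact le_of_lt (hother q (by rw [heq]; exact List.mem_append_right _ (by simp [hq])) hqe)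
    rcases hcases with h | h | h | h | h | h
    · rw [hfold [] ("CIRCA", 1) _ rfl h.symm]
      simp [htgt, h, isCircaW]
    · rw [hfold [("CIRCA", 1)] ("Circa", 1) _ rfl h.symm]
      simp [htgt, h, isCircaW]
    · rw [hfold [("CIRCA", 1), ("Circa", 1)] ("circa", 1) _ rfl h.symm]
      simp [htgt, h, isCircaW]
    · rw [hfold [("CIRCA", 1), ("Circa", 1), ("circa", 1)] ("MANUFACTURED", 2) _ rfl h.symm]
      simp [htgt, h, isCircaW]
    · rw [hfold [("CIRCA", 1), ("Circa", 1), ("circa", 1), ("MANUFACTURED", 2)] ("Manufactured", 2) _ rfl h.symm]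
      simp [htgt, h, isCircaW]
    · rw [hfold [("CIRCA", 1), ("Circa", 1), ("circa", 1), ("MANUFACTURED", 2), ("Manufactured", 2)] ("manufactured", 2) _ rfl h.symm]
      simp [htgt, h, isCircaW]

-- ===== VERDICT (by name: the statement is the Claim_ definition above) =====
theorem ModelYear_spec : Claim_equal_ModelYear := by
  intro ModelList _ _
  unfold Spec_ModelYear ModelYear ModelYear_alt
  match ModelList with
  | none => rfl
  | some [] => rfl
  | some (x :: _) =>
    simp only [PySem.List.slice?_none_none_neg_one, Option.getD_some]
    rw [index_eq]
    cases PySem.List.pyGet? (pySplitSpace (PySem.Str.strip x))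
        ((((List.range (pySplitSpace (PySem.Str.strip x)).length).foldl
            (aStep (pySplitSpace (PySem.Str.strip x))) none).getD 0 : Nat) : Int) with
    | none => rfl
    | some d => simp
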